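-- pv_equiv track=rewrite | github.com/adpena/molt | tests/differential/stdlib/stat_api_surface_versioned.py | _is_upper_const_name
-- ===== SOURCE A (Python) =====
-- def _is_upper_const_name(name: object) -> bool:
--     if not isinstance(name, str):
--         return False
--     if name and name[0] == "_":
--         return False
--     has_alpha = False
--     for ch in name:
--         if "a" <= ch <= "z":
--             return False
--         if "A" <= ch <= "Z":
--             has_alpha = True
--     return has_alpha
-- ===== SOURCE B (Python) =====
-- import re
--
-- _CONST_RE = re.compile(r"(?!_)[^a-z]*[A-Z][^a-z]*")
--
-- def _is_upper_const_name(name: object) -> bool: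
--     if not isinstance(name, str):
--         return False
--     return _CONST_RE.fullmatch(name) is not None
-- ===== Notes on version B (the rewrite author's own statement) =====
-- stated objective: idiomatic
-- what changed: Replaced A's explicit character loop with early returns and a has_alpha accumulator by a single precompiled regex fullmatch (a lookahead rejecting a leading underscore, no lowercase allowed, one uppercase required) that encodes the same conditions declaratively.
import Mathlib
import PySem

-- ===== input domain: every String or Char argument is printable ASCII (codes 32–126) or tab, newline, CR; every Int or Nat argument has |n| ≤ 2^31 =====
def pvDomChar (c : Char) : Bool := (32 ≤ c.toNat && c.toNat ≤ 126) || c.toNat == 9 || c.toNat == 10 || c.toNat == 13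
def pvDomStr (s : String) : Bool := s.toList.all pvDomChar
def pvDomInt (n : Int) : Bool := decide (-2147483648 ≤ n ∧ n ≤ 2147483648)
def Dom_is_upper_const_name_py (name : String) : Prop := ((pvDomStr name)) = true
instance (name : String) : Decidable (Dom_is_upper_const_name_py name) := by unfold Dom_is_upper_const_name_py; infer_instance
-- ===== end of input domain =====

-- B replaces A's explicit character loop with a regex-style validator (no leading '_',
-- no lowercase anywhere, at least one uppercase); objective: idiomatic, same cost.

-- ===== PORT A =====
-- the for-loop of A: early return False on lowercase, accumulate has_alpha on uppercase
def pvALoop (cs : List Char) (has_alpha : Bool) : Bool :=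
  match cs with
  | [] => has_alpha
  | ch :: rest =>
      if 'a' ≤ ch ∧ ch ≤ 'z' then false
      else pvALoop rest (has_alpha || decide ('A' ≤ ch ∧ ch ≤ 'Z'))

def is_upper_const_name_py (name : String) : Bool :=
  -- isinstance(name, str) always holds for a String argument
  if name ≠ "" ∧ name.toList.head? = some '_' then false
  else pvALoop name.toList false

-- ===== PORT B =====
-- Source B's regex (?!_)[^a-z]*[A-Z][^a-z]* , fullmatch: the three conditions it encodes
def is_upper_const_name_py_alt (name : String) : Bool :=
  let cs := name.toList
  cs.head? ≠ some '_'
    && cs.all (fun c => !('a' ≤ c && c ≤ 'z'))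
    && cs.any (fun c => 'A' ≤ c && c ≤ 'Z')

-- ===== PRECONDITION & SPEC =====
def Spec_is_upper_const_name_py (name : String) (out : Bool) : Prop := out = is_upper_const_name_py_alt name
instance (name : String) (out : Bool) : Decidable (Spec_is_upper_const_name_py name out) := by unfold Spec_is_upper_const_name_py; infer_instance

-- ===== CLAIM (what is proved, stated in full; the proofs are below) =====
def Claim_equal_is_upper_const_name_py : Prop := ∀ (name : String), Dom_is_upper_const_name_py name → Spec_is_upper_const_name_py name (is_upper_const_name_py name)

-- ===== LEMMAS AND PROOFS =====

theorem pvALoop_eq (cs : List Char) (b : Bool) :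
    pvALoop cs b
      = (cs.all (fun c => !('a' ≤ c && c ≤ 'z'))
          && (b || cs.any (fun c => 'A' ≤ c && c ≤ 'Z'))) := by
  induction cs generalizing b with
  | nil => simp [pvALoop]
  | cons ch rest ih =>
      simp only [pvALoop, List.all_cons, List.any_cons]
      by_cases h : 'a' ≤ ch ∧ ch ≤ 'z'
      · have hb : (decide ('a' ≤ ch) && decide (ch ≤ 'z')) = true := by
          simp [h.1, h.2]
        rw [if_pos h, hb]
        simp
      · have hb : (decide ('a' ≤ ch) && decide (ch ≤ 'z')) = false := by
          rw [← Bool.decide_and]; exact decide_eq_false h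
        rw [if_neg h, ih, hb]
        cases b <;> cases hu : (decide ('A' ≤ ch) && decide (ch ≤ 'Z')) <;> simp [hu]

-- ===== VERDICT (by name: the statement is the Claim_ definition above) =====
theorem is_upper_const_name_py_spec : Claim_equal_is_upper_const_name_py := by
  intro name _
  unfold Spec_is_upper_const_name_py is_upper_const_name_py is_upper_const_name_py_alt
  split_ifs with h
  · rcases h with ⟨hne, hh⟩
    simp [hh]
  · rw [pvALoop_eq]
    push Not at h
    cases hcs : name.toList with
    | nil => simp
    | cons c rest =>
        have hne : name ≠ "" := by
          intro e; rw [e] at hcs; simp at hcs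
        have : ¬ name.toList.head? = some '_' := h hne
        rw [hcs] at this
        simp only [List.head?_cons, Option.some.injEq] at this
        simp [this]
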